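-- pv_equiv track=rewrite | github.com/Protozx/VirtualSignals | doctor.py | divide_palabras
-- ===== SOURCE A (Python) =====
-- def divide_palabras(palabra1, palabra2):
--     segmentos = []
--     i = 0
--     while i < len(palabra1):
--         seg = palabra1[i:]
--         if palabra2.startswith(seg):
--             segmentos.append(seg)
--         i += 1
--     return segmentos
-- ===== SOURCE B (Python) =====
-- def divide_palabras(palabra1, palabra2):
--     # Z-algorithm on palabra2 + '\x00' + palabra1: a suffix of palabra1 starting at i
--     # is a prefix of palabra2 iff the Z-value at its position reaches the end.
--     n, m = len(palabra1), len(palabra2)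
--     s = palabra2 + "\x00" + palabra1
--     N = m + 1 + n
--     z = [0] * N
--     l = r = 0
--     for i in range(1, N):
--         zi = min(r - i, z[i - l]) if i < r else 0
--         while i + zi < N and s[zi] == s[i + zi]:
--             zi += 1
--         z[i] = zi
--         if i + zi > r:
--             l, r = i, i + zi
--     return [palabra1[i:] for i in range(n) if z[m + 1 + i] == n - i]
-- ===== Notes on version B (the rewrite author's own statement) =====
-- stated objective: alternative
-- what changed: B runs one Z-algorithm pass over palabra2 + '\x00' + palabra1 (maintaining the [l,r) match window and a z-array) and emits the suffixes whose Z-value reaches the end of the string, instead of A's per-start-index slice-and-startswith scan; the scan itself drops from O(n*(n+m)) to O(n+m) comparisons, but on match-heavy inputs the returned list of suffixes is itself quadratic in size, so wall-clock time is dominated by output construction and B is not measurably faster.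
import Mathlib
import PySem

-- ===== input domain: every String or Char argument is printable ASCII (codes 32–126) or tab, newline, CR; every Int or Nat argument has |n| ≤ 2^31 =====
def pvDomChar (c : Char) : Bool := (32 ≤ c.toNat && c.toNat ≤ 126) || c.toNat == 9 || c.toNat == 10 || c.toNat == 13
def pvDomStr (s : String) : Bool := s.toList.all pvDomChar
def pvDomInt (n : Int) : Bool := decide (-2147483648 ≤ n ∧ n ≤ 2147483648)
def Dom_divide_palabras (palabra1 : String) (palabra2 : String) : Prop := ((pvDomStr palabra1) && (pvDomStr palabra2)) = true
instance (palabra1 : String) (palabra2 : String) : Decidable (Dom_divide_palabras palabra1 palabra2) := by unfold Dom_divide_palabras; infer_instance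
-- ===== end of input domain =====

-- B replaces A's per-start-index slice-and-startswith scan by one Z-algorithm pass over
-- palabra2 + '\x00' + palabra1, emitting the suffixes whose Z-value reaches the end.

-- ===== PORT A =====
-- A's while loop: i from 0 while i < len(palabra1), seg = palabra1[i:], append if palabra2.startswith(seg)
def pvLoopA (palabra1 : String) (palabra2 : String) (segmentos : List String) (i : Nat) : List String :=
  if h : i < palabra1.toList.length then
    pvLoopA palabra1 palabra2
      (if PySem.Str.startswith palabra2 (PySem.Str.slice palabra1 (some (i : Int)) none) then
        segmentos ++ [PySem.Str.slice palabra1 (some (i : Int)) none]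
      else segmentos)
      (i + 1)
  else segmentos
termination_by palabra1.toList.length - i
decreasing_by omega

def divide_palabras (palabra1 : String) (palabra2 : String) : List String :=
  pvLoopA palabra1 palabra2 [] 0

-- ===== PORT B =====
-- Source B's inner while loop: while i + zi < N and s[zi] == s[i + zi]: zi += 1
-- (fuel bounds the iteration count; called with fuel = N - (i + zi), enough since zi stays below N - i)
def pvZExtend (s : List Char) (N : Nat) (i : Nat) : Nat → Nat → Nat
  | z, 0 => z
  | z, fuel + 1 =>
    if i + z < N ∧ s.getD z ' ' = s.getD (i + z) ' ' then pvZExtend s N i (z + 1) fuel else z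

-- zi = min(r - i, z[i - l]) if i < r else 0, then extended by the while loop
def pvZ0 (z : List Nat) (i l r : Nat) : Nat :=
  if i < r then min (r - i) (z.getD (i - l) 0) else 0

def pvZi (s : List Char) (N : Nat) (z : List Nat) (i l r : Nat) : Nat :=
  pvZExtend s N i (pvZ0 z i l r) (N - (i + pvZ0 z i l r))

-- Source B's main for loop over i in range(1, N) maintaining the z array and the window [l, r)
def pvZLoop (s : List Char) (N : Nat) (i : Nat) (z : List Nat) (l r : Nat) : List Nat :=
  if i < N then
    if r < i + pvZi s N z i l r then
      pvZLoop s N (i + 1) (z.set i (pvZi s N z i l r)) i (i + pvZi s N z i l r)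
    else
      pvZLoop s N (i + 1) (z.set i (pvZi s N z i l r)) l r
  else z
termination_by N - i
decreasing_by all_goals omega

-- Source B's final comprehension: [palabra1[i:] for i in range(n) if z[m+1+i] == n-i]
def pvCollect (palabra1 : String) (m n : Nat) (z : List Nat) : List String :=
  (List.range n).foldl
    (fun segmentos i =>
      if z.getD (m + 1 + i) 0 = n - i then
        segmentos ++ [PySem.Str.slice palabra1 (some (i : Int)) none]
      else segmentos)
    []

def divide_palabras_alt (palabra1 : String) (palabra2 : String) : List String :=
  pvCollect palabra1 palabra2.toList.length palabra1.toList.length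
    (pvZLoop (palabra2.toList ++ '\x00' :: palabra1.toList)
      (palabra2.toList.length + 1 + palabra1.toList.length) 1
      (List.replicate (palabra2.toList.length + 1 + palabra1.toList.length) 0) 0 0)

-- ===== PRECONDITION & SPEC =====
def Spec_divide_palabras (palabra1 : String) (palabra2 : String) (out : List String) : Prop := out = divide_palabras_alt palabra1 palabra2
instance (palabra1 : String) (palabra2 : String) (out : List String) : Decidable (Spec_divide_palabras palabra1 palabra2 out) := by unfold Spec_divide_palabras; infer_instance

-- ===== CLAIM (what is proved, stated in full; the proofs are below) =====
def Claim_equal_divide_palabras : Prop := ∀ (palabra1 : String) (palabra2 : String), Dom_divide_palabras palabra1 palabra2 → Spec_divide_palabras palabra1 palabra2 (divide_palabras palabra1 palabra2)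

-- ===== LEMMAS AND PROOFS =====

-- length of the longest common prefix of two character lists
def pvLcp : List Char → List Char → Nat
  | a :: as, b :: bs => if a = b then pvLcp as bs + 1 else 0
  | _, _ => 0

theorem pvLcp_le_left (a b : List Char) : pvLcp a b ≤ a.length := by
  induction a generalizing b with
  | nil => simp [pvLcp]
  | cons x xs ih =>
    cases b with
    | nil => simp [pvLcp]
    | cons y ys =>
      simp only [pvLcp, List.length_cons]
      split_ifs
      · have := ih ys; omega
      · omega

theorem pvLcp_le_right (a b : List Char) : pvLcp a b ≤ b.length := by
  induction a generalizing b with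
  | nil => simp [pvLcp]
  | cons x xs ih =>
    cases b with
    | nil => simp [pvLcp]
    | cons y ys =>
      simp only [pvLcp, List.length_cons]
      split_ifs
      · have := ih ys; omega
      · omega

theorem pvLcp_getElem? (a b : List Char) (j : Nat) (h : j < pvLcp a b) : a[j]? = b[j]? := by
  induction a generalizing b j with
  | nil => simp [pvLcp] at h
  | cons x xs ih =>
    cases b with
    | nil => simp [pvLcp] at h
    | cons y ys =>
      simp only [pvLcp] at h
      split_ifs at h with hxy
      · cases j with
        | zero => simp [hxy]
        | succ j' => simpa using ih ys j' (by omega)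
      · omega

theorem pvLcp_ne (a b : List Char) (h1 : pvLcp a b < a.length) (h2 : pvLcp a b < b.length) :
    a[pvLcp a b]? ≠ b[pvLcp a b]? := by
  induction a generalizing b with
  | nil => simp at h1
  | cons x xs ih =>
    cases b with
    | nil => simp at h2
    | cons y ys =>
      simp only [pvLcp, List.length_cons] at *
      split_ifs at * with hxy
      · simpa using ih ys (by omega) (by omega)
      · simpa using hxy

theorem pvLcp_ge (a b : List Char) (v : Nat) (hva : v ≤ a.length) (hvb : v ≤ b.length)
    (h : ∀ j, j < v → a[j]? = b[j]?) : v ≤ pvLcp a b := by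
  rcases Nat.lt_or_ge (pvLcp a b) v with hlt | hge
  · exact absurd (h _ hlt) (pvLcp_ne a b (by omega) (by omega))
  · exact hge

theorem pvLcp_of_prefix (a b : List Char) (h : b <+: a) : pvLcp a b = b.length := by
  have hle : b.length ≤ a.length := h.length_le
  refine le_antisymm (pvLcp_le_right a b) (pvLcp_ge a b b.length hle (le_refl _) ?_)
  intro j hj
  rw [List.prefix_iff_eq_take] at h
  rw [h]
  exact (List.getElem?_take_of_lt hj).symm

theorem pvPrefix_of_lcp (a b : List Char) (h : pvLcp a b = b.length) : b <+: a := by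
  have hle : b.length ≤ a.length := h ▸ pvLcp_le_left a b
  rw [List.prefix_iff_eq_take]
  apply List.ext_getElem?
  intro j
  by_cases hj : j < b.length
  · rw [List.getElem?_take_of_lt hj]
    exact (pvLcp_getElem? a b j (by omega)).symm
  · rw [List.getElem?_eq_none (by omega), List.getElem?_eq_none (by simp; omega)]

-- the extension loop, started below the true Z-value with enough fuel, computes it exactly
theorem pvZExtend_eq (s : List Char) (i : Nat) (hi : 1 ≤ i) (fuel z0 : Nat)
    (hz : z0 ≤ pvLcp s (s.drop i)) (hfuel : pvLcp s (s.drop i) - z0 ≤ fuel) :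
    pvZExtend s s.length i z0 fuel = pvLcp s (s.drop i) := by
  induction fuel generalizing z0 with
  | zero => simp only [pvZExtend]; omega
  | succ fuel ih =>
    have hdl : (s.drop i).length = s.length - i := List.length_drop
    have hL : pvLcp s (s.drop i) ≤ s.length - i := hdl ▸ pvLcp_le_right s (s.drop i)
    rcases Nat.lt_or_ge z0 (pvLcp s (s.drop i)) with hlt | hge
    · have hin : i + z0 < s.length := by omega
      have hchar : s[z0]? = s[i + z0]? := by
        have := pvLcp_getElem? s (s.drop i) z0 hlt
        rwa [List.getElem?_drop] at this
      have hgd : s.getD z0 ' ' = s.getD (i + z0) ' ' := by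
        rw [List.getD_eq_getElem?_getD, List.getD_eq_getElem?_getD, hchar]
      rw [pvZExtend, if_pos ⟨hin, hgd⟩]
      exact ih (z0 + 1) (by omega) (by omega)
    · have heq : z0 = pvLcp s (s.drop i) := by omega
      rw [pvZExtend]
      by_cases hin : i + z0 < s.length
      · have hne : s[z0]? ≠ s[i + z0]? := by
          have := pvLcp_ne s (s.drop i) (by omega) (by omega)
          rw [List.getElem?_drop] at this
          rw [heq]; exact this
        have h1 : z0 < s.length := by omega
        rw [if_neg]
        · exact heq
        · rintro ⟨-, hc⟩
          apply hne
          rw [List.getD_eq_getElem?_getD, List.getD_eq_getElem?_getD,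
            List.getElem?_eq_getElem h1, List.getElem?_eq_getElem hin] at hc
          rw [List.getElem?_eq_getElem h1, List.getElem?_eq_getElem hin]
          simpa using hc
      · rw [if_neg (by intro hc; exact hin hc.1)]
        exact heq

-- window shortcut is a valid lower-bound seed for the Z-value at i
theorem pvWindow (s : List Char) (l i r : Nat) (hl : l < i) (hir : i < r) (hr : r ≤ s.length)
    (hwin : r - l ≤ pvLcp s (s.drop l)) :
    min (r - i) (pvLcp s (s.drop (i - l))) ≤ pvLcp s (s.drop i) := by
  set v := min (r - i) (pvLcp s (s.drop (i - l))) with hv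
  apply pvLcp_ge
  · omega
  · rw [List.length_drop]; omega
  · intro j hj
    have hj1 : j < pvLcp s (s.drop (i - l)) := by omega
    have e1 : s[j]? = s[(i - l) + j]? := by
      have := pvLcp_getElem? s (s.drop (i - l)) j hj1
      rwa [List.getElem?_drop] at this
    have hj2 : (i - l) + j < pvLcp s (s.drop l) := by omega
    have e2 : s[(i - l) + j]? = s[l + ((i - l) + j)]? := by
      have := pvLcp_getElem? s (s.drop l) _ hj2
      rwa [List.getElem?_drop] at this
    have hidx : l + ((i - l) + j) = i + j := by omega
    rw [List.getElem?_drop, e1, e2, hidx]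

-- main-loop invariant: after the loop every cell 1 ≤ j < N holds the true Z-value
theorem pvZLoop_getD (s : List Char) (N i l r : Nat) (z : List Nat)
    (hs : s.length = N) (hlen : z.length = N) (hi : 1 ≤ i) (hli : l < i) (hr : r ≤ N)
    (hwin : r - l ≤ pvLcp s (s.drop l)) (hl0 : r = 0 ∨ 1 ≤ l)
    (hz : ∀ j, 1 ≤ j → j < i → z.getD j 0 = pvLcp s (s.drop j)) :
    ∀ j, 1 ≤ j → j < N → (pvZLoop s N i z l r).getD j 0 = pvLcp s (s.drop j) := by
  by_cases h : i < N
  · have hdl : (s.drop i).length = s.length - i := List.length_drop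
    have hL : pvLcp s (s.drop i) ≤ N - i := by
      have := pvLcp_le_right s (s.drop i); omega
    have hz0 : pvZ0 z i l r ≤ pvLcp s (s.drop i) := by
      unfold pvZ0
      split_ifs with hir
      · have hl1 : 1 ≤ l := by rcases hl0 with h0 | h1; · omega
                               · exact h1
        have hst : z.getD (i - l) 0 = pvLcp s (s.drop (i - l)) := hz (i - l) (by omega) (by omega)
        rw [hst]
        exact pvWindow s l i r hli hir (by rw [hs]; exact hr) hwin
      · omega
    have hzi : pvZi s N z i l r = pvLcp s (s.drop i) := by
      unfold pvZi
      rw [← hs]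
      exact pvZExtend_eq s i hi _ _ hz0 (by omega)
    have hlen' : (z.set i (pvZi s N z i l r)).length = N := by simp [hlen]
    have hz' : ∀ j, 1 ≤ j → j < i + 1 →
        (z.set i (pvZi s N z i l r)).getD j 0 = pvLcp s (s.drop j) := by
      intro j h1 h2
      rw [List.getD_eq_getElem?_getD, List.getElem?_set]
      by_cases hij : i = j
      · subst hij
        rw [if_pos rfl, if_pos (by omega), hzi]
        simp
      · rw [if_neg hij, ← List.getD_eq_getElem?_getD]
        exact hz j h1 (by omega)
    rw [pvZLoop, if_pos h]
    by_cases hcase : r < i + pvZi s N z i l r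
    · rw [if_pos hcase]
      exact pvZLoop_getD s N (i + 1) i (i + pvZi s N z i l r) _
        hs hlen' (by omega) (by omega) (by omega) (by rw [hzi]; omega) (by omega) hz'
    · rw [if_neg hcase]
      exact pvZLoop_getD s N (i + 1) l r _ hs hlen' (by omega) (by omega) hr hwin hl0 hz'
  · rw [pvZLoop, if_neg h]
    intro j h1 h2
    exact hz j h1 (by omega)
termination_by N - i
decreasing_by all_goals omega

-- under the printable-ASCII domain the Z-value at position m+1+i equals n-i
-- exactly when the suffix palabra1[i:] is a prefix of palabra2
theorem pvCond (p1 p2 : List Char) (i : Nat) (_hin : i < p1.length)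
    (hdom : ∀ c ∈ p1, pvDomChar c = true) :
    (pvLcp (p2 ++ '\x00' :: p1) ((p2 ++ '\x00' :: p1).drop (p2.length + 1 + i)) = p1.length - i)
      ↔ PySem.Chars.startswith p2 (p1.drop i) = true := by
  have hdr : (p2 ++ '\x00' :: p1).drop (p2.length + 1 + i) = p1.drop i := by
    have he : p2.length + 1 + i = p2.length + (1 + i) := by omega
    rw [he, List.drop_length_add_append, Nat.add_comm 1 i, List.drop_succ_cons]
  rw [hdr, PySem.Chars.startswith_iff]
  have hlt : (p1.drop i).length = p1.length - i := List.length_drop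
  constructor
  · intro hl
    have hpre : p1.drop i <+: (p2 ++ '\x00' :: p1) := pvPrefix_of_lcp _ _ (by omega)
    by_cases hsz : p1.length - i ≤ p2.length
    · rw [List.prefix_iff_eq_take] at hpre ⊢
      rw [hpre, hlt, List.take_append_of_le_length hsz, List.length_take]
      congr 1
      omega
    · exfalso
      have hm : p2.length < (p1.drop i).length := by omega
      have h1 : (p1.drop i)[p2.length]? = (p2 ++ '\x00' :: p1)[p2.length]? := by
        rw [List.prefix_iff_eq_take] at hpre
        rw [hpre]
        exact List.getElem?_take_of_lt hm
      rw [List.getElem?_drop, List.getElem?_append_right (le_refl _)] at h1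
      simp only [Nat.sub_self, List.getElem?_cons_zero] at h1
      exact absurd (hdom _ (List.mem_of_getElem? h1)) (by decide)
  · intro hpre
    have hpre' : p1.drop i <+: (p2 ++ '\x00' :: p1) :=
      hpre.trans (List.prefix_append p2 ('\x00' :: p1))
    rw [pvLcp_of_prefix _ _ hpre', hlt]

-- A's loop gathers, for i ascending, the slices palabra1[i:] passing the startswith test
def pvGather (palabra1 : String) (palabra2 : String) (i : Nat) : List String :=
  if _h : i < palabra1.toList.length then
    (if PySem.Chars.startswith palabra2.toList (palabra1.toList.drop i) then
      [PySem.Str.slice palabra1 (some (i : Int)) none] else []) ++ pvGather palabra1 palabra2 (i + 1)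
  else []
termination_by palabra1.toList.length - i
decreasing_by omega

theorem pvLoopA_eq_gather (p1 p2 : String) (acc : List String) (i : Nat) :
    pvLoopA p1 p2 acc i = acc ++ pvGather p1 p2 i := by
  by_cases h : i < p1.toList.length
  · rw [pvLoopA, dif_pos h, pvLoopA_eq_gather]
    conv_rhs => rw [pvGather]
    rw [dif_pos h]
    have hts : (PySem.Str.slice p1 (some (i : Int)) none).toList = p1.toList.drop i := by
      rw [PySem.Str.toList_slice, PySem.Chars.slice_eq_listSlice, PySem.List.slice_from_natCast]
    rw [PySem.Str.startswith_eq, hts]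
    split_ifs <;> simp
  · rw [pvLoopA, dif_neg h]
    conv_rhs => rw [pvGather]
    rw [dif_neg h, List.append_nil]
termination_by p1.toList.length - i
decreasing_by omega

-- B's final fold equals the same gather once its test agrees with startswith pointwise
theorem pvFold_eq_gather (p1 p2 : String) (c : Nat → Prop) [DecidablePred c]
    (hc : ∀ j, j < p1.toList.length →
      (c j ↔ PySem.Chars.startswith p2.toList (p1.toList.drop j) = true))
    (i : Nat) (acc : List String) :
    (List.range' i (p1.toList.length - i)).foldl
      (fun segmentos j =>
        if c j then segmentos ++ [PySem.Str.slice p1 (some (j : Int)) none] else segmentos)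
      acc = acc ++ pvGather p1 p2 i := by
  by_cases h : i < p1.toList.length
  · have hk : p1.toList.length - i = (p1.toList.length - (i + 1)) + 1 := by omega
    rw [hk, List.range'_succ, List.foldl_cons, pvFold_eq_gather p1 p2 c hc (i + 1)]
    conv_rhs => rw [pvGather]
    rw [dif_pos h]
    by_cases hci : c i
    · rw [if_pos hci, if_pos ((hc i h).mp hci)]
      simp
    · rw [if_neg hci, if_neg (fun hco => hci ((hc i h).mpr hco))]
      simp
  · conv_rhs => rw [pvGather]
    rw [dif_neg h]
    have h0 : p1.toList.length - i = 0 := by omega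
    rw [h0]
    simp
termination_by p1.toList.length - i
decreasing_by omega

-- ===== VERDICT (by name: the statement is the Claim_ definition above) =====
theorem divide_palabras_spec : Claim_equal_divide_palabras := by
  intro p1 p2 hdom
  unfold Spec_divide_palabras divide_palabras divide_palabras_alt pvCollect
  have hdom1 : ∀ c ∈ p1.toList, pvDomChar c = true := by
    unfold Dom_divide_palabras pvDomStr at hdom
    rw [Bool.and_eq_true] at hdom
    exact List.all_eq_true.mp hdom.1
  have hs : (p2.toList ++ '\x00' :: p1.toList).length
      = p2.toList.length + 1 + p1.toList.length := by
    simp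
    omega
  have hzval : ∀ j, 1 ≤ j → j < p2.toList.length + 1 + p1.toList.length →
      (pvZLoop (p2.toList ++ '\x00' :: p1.toList)
        (p2.toList.length + 1 + p1.toList.length) 1
        (List.replicate (p2.toList.length + 1 + p1.toList.length) 0) 0 0).getD j 0
      = pvLcp (p2.toList ++ '\x00' :: p1.toList) ((p2.toList ++ '\x00' :: p1.toList).drop j) :=
    pvZLoop_getD _ _ 1 0 0 _ hs (by simp) (le_refl _) (by omega) (by omega) (by simp)
      (Or.inl rfl) (by intro j h1 h2; omega)
  rw [pvLoopA_eq_gather, List.nil_append, List.range_eq_range']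
  have h0 : p1.toList.length = p1.toList.length - 0 := by omega
  rw [show List.range' 0 p1.toList.length = List.range' 0 (p1.toList.length - 0) from by rw [← h0]]
  rw [pvFold_eq_gather p1 p2
    (fun j => (pvZLoop (p2.toList ++ '\x00' :: p1.toList)
        (p2.toList.length + 1 + p1.toList.length) 1
        (List.replicate (p2.toList.length + 1 + p1.toList.length) 0) 0 0).getD
        (p2.toList.length + 1 + j) 0 = p1.toList.length - j)
    ?_ 0 []]
  · rw [List.nil_append]
  · intro j hj
    have hz := hzval (p2.toList.length + 1 + j) (by omega) (by omega)
    simpa only [hz] using pvCond p1.toList p2.toList j hj hdom1
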